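-- pv_equiv track=rewrite | github.com/ChuhanXU/LeetCode | Robinhood/rotateAndFall.py | rotateAndFall
-- ===== SOURCE A (Python) =====
-- def rotateAndFall(box):
--     m,n = len(box),len(box[0])
--     for i in range(m):
--         moving = True
--         while moving:
--             moving = False
--             for j in range(n-1,-1,-1):
--                 if box[i][j]=='.' or box[i][j]=='*' or j==n-1:
--                     continue
--                 if box[i][j+1]=='.':
--                     moving = True
--                     box[i][j+1] = '#'
--                     box[i][j]='.'
--     rotated = [[box[m-1-j][i] for j in range(m)]for i in range(n)]
--     return rotated
-- ===== SOURCE B (Python) =====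
-- def packSeg(seg):
--     # cells after the last '.' never move and keep their value;
--     # everything before them packs as the dots followed by '#' stones
--     i = len(seg)
--     while i > 0 and seg[i - 1] != '.':
--         i -= 1
--     dots = seg.count('.')
--     return ['.'] * dots + ['#'] * (i - dots) + seg[i:]
--
--
-- def rotateAndFall(box):
--     n = len(box[0])
--     fallen = []
--     for row in box:
--         out = []
--         seg = []
--         for c in row[:n]:
--             if c == '*':
--                 out += packSeg(seg)
--                 out.append('*')
--                 seg = []
--             else:
--                 seg.append(c)
--         out += packSeg(seg)
--         fallen.append(out)
--     return [[r[i] for r in fallen[::-1]] for i in range(n)]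
-- ===== Notes on version B (the rewrite author's own statement) =====
-- stated objective: faster
-- what changed: A repeatedly sweeps each row right-to-left moving every stone one cell at a time until a full sweep makes no move; B settles each row in a single left-to-right pass that packs every segment between obstacles at once (count of dots, moved stones as '#', unmoved tail kept verbatim), then rotates by transposing the reversed rows.
import Mathlib
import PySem

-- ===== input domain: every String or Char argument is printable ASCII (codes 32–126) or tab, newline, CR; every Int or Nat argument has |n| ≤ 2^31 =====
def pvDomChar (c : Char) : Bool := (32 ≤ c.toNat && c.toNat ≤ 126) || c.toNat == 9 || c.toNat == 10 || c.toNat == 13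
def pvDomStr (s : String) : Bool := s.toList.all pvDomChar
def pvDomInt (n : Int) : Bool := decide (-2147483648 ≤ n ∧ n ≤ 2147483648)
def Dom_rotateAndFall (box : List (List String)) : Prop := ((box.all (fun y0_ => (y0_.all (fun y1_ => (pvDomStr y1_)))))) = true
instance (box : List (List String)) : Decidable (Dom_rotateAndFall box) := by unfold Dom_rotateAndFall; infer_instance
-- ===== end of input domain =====

-- B replaces A's repeat-until-fixpoint sweeps by a single left-to-right segment-packing pass
-- per row; A mutates its argument in place, B does not — the equivalence proved here is about
-- the RETURN value only.

-- ===== PORT A =====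

-- body of A's inner 'for j in range(n-1,-1,-1)' loop; state = (box[i], moving)
def rfBody (n : Nat) (rm : List String × Bool) (j : Int) : List String × Bool :=
  if (PySem.List.pyGet? rm.1 j).getD "" = "." ∨ (PySem.List.pyGet? rm.1 j).getD "" = "*"
      ∨ j = (n : Int) - 1 then rm
  else if (PySem.List.pyGet? rm.1 (j + 1)).getD "" = "." then
    (PySem.List.pySetD (PySem.List.pySetD rm.1 (j + 1) "#") j ".", true)
  else rm

-- one full sweep of the inner for-loop, starting from moving = False
def rfPass (n : Nat) (row : List String) : List String × Bool :=
  (PySem.List.pyRange ((n : Int) - 1) (-1) (-1)).foldl (rfBody n) (row, false)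

def rfWhileFuel : Nat → Nat → List String → List String
  | 0, _, row => row
  | fuel + 1, n, row =>
    if (rfPass n row).2 = true then rfWhileFuel fuel n (rfPass n row).1 else (rfPass n row).1

def rfWhile (n : Nat) (row : List String) : List String :=
  rfWhileFuel (n * n + 1) n row

def rotateAndFall (box : List (List String)) : List (List String) :=
  let m := box.length
  let n := ((PySem.List.pyGet? box 0).getD []).length
  let fallen := box.map (fun row => rfWhile n row)
  (PySem.List.pyRange 0 (n : Int) 1).map (fun i =>
    (PySem.List.pyRange 0 (m : Int) 1).map (fun j =>
      (PySem.List.pyGet? ((PySem.List.pyGet? fallen ((m : Int) - 1 - j)).getD []) i).getD ""))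

-- ===== PORT B =====

-- Source B packSeg: the while loop computes len(seg) minus the length of the maximal '.'-free
-- suffix of seg (cells that never move); ported as takeWhile on the reversed list — exact
def packSeg (seg : List String) : List String :=
  let i := seg.length - (seg.reverse.takeWhile (fun c => c ≠ ".")).length
  let dots := seg.count "."
  List.replicate dots "." ++ List.replicate (i - dots) "#" ++ seg.drop i

-- Source B's per-row accumulator loop over row[:n]  (row[:n] = List.take n since n ≥ 0 — exact)
def settleRow (n : Nat) (row : List String) : List String :=
  let st := (row.take n).foldl
    (fun (st : List String × List String) c =>
      if c = "*" then (st.1 ++ packSeg st.2 ++ ["*"], ([] : List String))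
      else (st.1, st.2 ++ [c])) ([], [])
  st.1 ++ packSeg st.2

def rotateAndFall_alt (box : List (List String)) : List (List String) :=
  let n := ((PySem.List.pyGet? box 0).getD []).length
  let fallen := box.map (fun row => settleRow n row)
  (List.range n).map (fun (i : Nat) => fallen.reverse.map (fun r => (PySem.List.pyGet? r (i : Int)).getD ""))

-- ===== PRECONDITION & SPEC =====
-- Pre_: exactly the inputs where the Python A returns: box nonempty (len(box[0]) raises
-- IndexError on []) and every row at least as long as row 0 (the sweep reads box[i][n-1])
def Pre_rotateAndFall (box : List (List String)) : Prop :=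
  box ≠ [] ∧ ∀ r ∈ box, (box.headI).length ≤ r.length
instance (box : List (List String)) : Decidable (Pre_rotateAndFall box) := by
  unfold Pre_rotateAndFall; infer_instance

def pvWitness_rotateAndFall : List (List String) :=
  [["#", ".", "*", "."], [".", "#", ".", "#"], ["*", ".", "#", "."]]

def Spec_rotateAndFall (box : List (List String)) (out : List (List String)) : Prop := out = rotateAndFall_alt box
instance (box : List (List String)) (out : List (List String)) : Decidable (Spec_rotateAndFall box out) := by unfold Spec_rotateAndFall; infer_instance

-- ===== CLAIM (what is proved, stated in full; the proofs are below) =====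
def Claim_equal_rotateAndFall : Prop := ∀ (box : List (List String)), Dom_rotateAndFall box → Pre_rotateAndFall box → Spec_rotateAndFall box (rotateAndFall box)

-- ===== LEMMAS AND PROOFS =====

-- termination measure for A's 'while moving' loop: weighted sum of stone positions; a sweep
-- that reports moving = True strictly increases it (every move shifts a stone one step right)
def rfPhi (n : Nat) (row : List String) : Nat :=
  ∑ j ∈ Finset.range n, if row.getD j "" = "." then 0 else j

-- A's 'while moving' loop for one row; the fuel argument only makes the same computation
-- structurally total: n*n+1 sweeps always suffice (proved below: a sweep that still moves
-- strictly increases the weighted stone-position sum rfPhi, which is bounded by n*(n-1))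
lemma getD_set' (xs : List String) (i k : Nat) (v d : String) :
    (xs.set i v).getD k d = if k = i ∧ i < xs.length then v else xs.getD k d := by
  simp only [List.getD_eq_getElem?_getD, List.getElem?_set]
  split_ifs with h1 h2 h3 h4 <;> simp_all

lemma rfPhi_move (n : Nat) (r : List String) (k : Nat) (hk : k + 1 < n)
    (hlen : k + 1 < r.length) (hc : r.getD k "" ≠ ".") (hd : r.getD (k+1) "" = ".") :
    rfPhi n ((r.set (k + 1) "#").set k ".") = rfPhi n r + 1 := by
  classical
  set r' := (r.set (k + 1) "#").set k "." with hr'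
  have hgd : ∀ m, m ≠ k → m ≠ k + 1 → r'.getD m "" = r.getD m "" := by
    intro m h1 h2
    rw [hr', getD_set', getD_set']
    simp [h1, h2]
  have hk' : r'.getD k "" = "." := by
    rw [hr', getD_set']
    simp [Nat.lt_of_succ_lt hlen]
  have hk1 : r'.getD (k + 1) "" = "#" := by
    rw [hr', getD_set', getD_set']
    simp [hlen]
  have hmem : k + 1 ∈ (Finset.range n).erase k := by
    simp [Finset.mem_erase]; omega
  have hrw : Finset.range n =
      insert k (insert (k + 1) (((Finset.range n).erase k).erase (k + 1))) := by
    rw [Finset.insert_erase hmem, Finset.insert_erase (by simp; omega)]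
  have hknotin : k ∉ insert (k + 1) (((Finset.range n).erase k).erase (k + 1)) := by
    simp [Finset.mem_erase]
  have hk1notin : k + 1 ∉ ((Finset.range n).erase k).erase (k + 1) := by
    simp [Finset.mem_erase]
  unfold rfPhi
  rw [hrw, Finset.sum_insert hknotin, Finset.sum_insert hk1notin,
      Finset.sum_insert hknotin, Finset.sum_insert hk1notin]
  have hsum : ∑ m ∈ ((Finset.range n).erase k).erase (k + 1),
      (if r'.getD m "" = "." then 0 else m) =
      ∑ m ∈ ((Finset.range n).erase k).erase (k + 1),
      (if r.getD m "" = "." then 0 else m) := by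
    apply Finset.sum_congr rfl
    intro m hm
    simp only [Finset.mem_erase] at hm
    rw [hgd m hm.2.1 hm.1]
  rw [hsum, hk', hk1]
  have e1 : (if ("." : String) = "." then 0 else k) = 0 := if_pos rfl
  have e2 : (if ("#" : String) = "." then (0:Nat) else k + 1) = k + 1 := if_neg (by decide)
  rw [e1, e2, if_neg hc, if_pos hd]
  omega

lemma rfBody_phi (n : Nat) (s : List String × Bool) (j : Int)
    (hj : 0 ≤ j ∧ j ≤ (n : Int) - 1) :
    rfPhi n s.1 ≤ rfPhi n (rfBody n s j).1 ∧
      ((rfBody n s j).2 = true → s.2 = true ∨ rfPhi n s.1 < rfPhi n (rfBody n s j).1) := by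
  obtain ⟨hj0, hjn⟩ := hj
  unfold rfBody
  split_ifs with h1 h2
  · exact ⟨le_refl _, fun h => Or.inl h⟩
  · -- move branch
    simp only
    have hd : PySem.List.pyGet? s.1 (j + 1) = some "." := by
      cases hopt : PySem.List.pyGet? s.1 (j + 1) with
      | none => rw [hopt] at h2; simp at h2
      | some v => rw [hopt] at h2; simp at h2; rw [h2]
    rw [PySem.List.pyGet?_of_nonneg s.1 (by omega : (0:Int) ≤ j + 1)] at hd
    have hlen : (j + 1).toNat < s.1.length := by
      by_contra hcon
      rw [List.getElem?_eq_none (by omega)] at hd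
      simp at hd
    have hk1 : (j + 1).toNat = j.toNat + 1 := by omega
    rw [hk1] at hd hlen
    have hdget : s.1.getD (j.toNat + 1) "" = "." := by
      rw [List.getD_eq_getElem?_getD, hd]
      rfl
    have hcget : s.1.getD j.toNat "" ≠ "." := by
      push_neg at h1
      have hjlen : j.toNat < s.1.length := by omega
      rw [PySem.List.pyGet?_of_nonneg s.1 hj0] at h1
      rw [List.getD_eq_getElem?_getD, List.getElem?_eq_getElem hjlen]
      rw [List.getElem?_eq_getElem hjlen] at h1
      simp only [Option.getD_some] at h1 ⊢
      exact h1.1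
    have hkn : j.toNat + 1 < n := by
      push_neg at h1
      have := h1.2.2
      omega
    rw [PySem.List.pySetD_of_nonneg _ _ (by omega : (0:Int) ≤ j + 1),
        PySem.List.pySetD_of_nonneg _ _ hj0, hk1]
    rw [rfPhi_move n s.1 j.toNat hkn hlen hcget hdget]
    exact ⟨by omega, fun _ => Or.inr (by omega)⟩
  · exact ⟨le_refl _, fun h => Or.inl h⟩

lemma rfFold_phi (n : Nat) (js : List Int) (hjs : ∀ j ∈ js, 0 ≤ j ∧ j ≤ (n : Int) - 1)
    (s : List String × Bool) :
    rfPhi n s.1 ≤ rfPhi n (js.foldl (rfBody n) s).1 ∧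
      ((js.foldl (rfBody n) s).2 = true →
        s.2 = true ∨ rfPhi n s.1 < rfPhi n (js.foldl (rfBody n) s).1) := by
  induction js generalizing s with
  | nil => exact ⟨le_refl _, fun h => Or.inl h⟩
  | cons j js ih =>
    simp only [List.foldl_cons]
    have hstep := rfBody_phi n s j (hjs j (by simp))
    have hrest := ih (fun j' hj' => hjs j' (by simp [hj'])) (rfBody n s j)
    refine ⟨le_trans hstep.1 hrest.1, fun h => ?_⟩
    rcases hrest.2 h with h2 | h2
    · rcases hstep.2 h2 with h3 | h3
      · exact Or.inl h3
      · exact Or.inr (lt_of_lt_of_le h3 hrest.1)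
    · exact Or.inr (lt_of_le_of_lt hstep.1 h2)

lemma rfPhi_le (n : Nat) (row : List String) : rfPhi n row ≤ n * (n - 1) := by
  unfold rfPhi
  calc ∑ j ∈ Finset.range n, (if row.getD j "" = "." then 0 else j)
      ≤ ∑ j ∈ Finset.range n, (n - 1) := by
        apply Finset.sum_le_sum
        intro j hj
        simp only [Finset.mem_range] at hj
        split_ifs <;> omega
    _ = n * (n - 1) := by simp [Finset.sum_const, mul_comm]

lemma rfPass_progress (n : Nat) (row : List String) (h : (rfPass n row).2 = true) :
    n * n - rfPhi n (rfPass n row).1 < n * n - rfPhi n row := by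
  unfold rfPass at *
  have hmem : ∀ j ∈ PySem.List.pyRange ((n : Int) - 1) (-1) (-1), 0 ≤ j ∧ j ≤ (n : Int) - 1 := by
    intro j hj
    rw [PySem.List.mem_pyRange_neg_one] at hj
    omega
  have := rfFold_phi n _ hmem (row, false)
  rcases this.2 h with h2 | h2
  · exact absurd h2 (by simp)
  · have h2' : rfPhi n row <
        rfPhi n ((PySem.List.pyRange ((n : Int) - 1) (-1) (-1)).foldl (rfBody n) (row, false)).1 := by
      simpa using h2
    have hle := rfPhi_le n ((PySem.List.pyRange ((n : Int) - 1) (-1) (-1)).foldl (rfBody n) (row, false)).1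
    have hnn : n * n = n * (n - 1) + n := by
      cases n with
      | zero => rfl
      | succ m => simp only [Nat.add_sub_cancel]; ring
    omega

-- proof-side recursive characterisation of B's row result: split at the first '*'
def settleSpec (row : List String) : List String :=
  if hr : row.dropWhile (fun c => c ≠ "*") = [] then packSeg (row.takeWhile (fun c => c ≠ "*"))
  else packSeg (row.takeWhile (fun c => c ≠ "*")) ++
    "*" :: settleSpec (row.dropWhile (fun c => c ≠ "*")).tail
termination_by row.length
decreasing_by
  have h1 := List.length_dropWhile_le (fun c => c ≠ "*") row
  have h2 : (row.dropWhile (fun c => c ≠ "*")).length ≠ 0 := by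
    simpa [List.length_eq_zero_iff] using hr
  simp only [List.length_tail]; omega

-- the adjacency invariant that holds when a sweep reports moving = False
def RowSettled (l : List String) : Prop :=
  ∀ k, k + 1 < l.length → l.getD k "" ≠ "." → l.getD k "" ≠ "*" → l.getD (k + 1) "" ≠ "."

-- zeta-free unfolding of packSeg
lemma packSeg_eq (seg : List String) : packSeg seg =
    List.replicate (seg.count ".") "." ++
    List.replicate ((seg.length - (seg.reverse.takeWhile (fun c => c ≠ ".")).length) -
      seg.count ".") "#" ++
    seg.drop (seg.length - (seg.reverse.takeWhile (fun c => c ≠ ".")).length) := rfl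

-- ---- small getD helpers ----

lemma pyGetD_nat (xs : List String) (k : Nat) (d : String) :
    (PySem.List.pyGet? xs (k : Int)).getD d = xs.getD k d := by
  rw [PySem.List.pyGet?_natCast, List.getD_eq_getElem?_getD]

lemma getD_append_left (u v : List String) (k : Nat) (h : k < u.length) (d : String) :
    (u ++ v).getD k d = u.getD k d := by
  simp [List.getD_eq_getElem?_getD, List.getElem?_append, h]

lemma getD_append_right (u v : List String) (k : Nat) (d : String) :
    (u ++ v).getD (u.length + k) d = v.getD k d := by
  simp [List.getD_eq_getElem?_getD, List.getElem?_append]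

lemma getD_take (l : List String) (n k : Nat) (h : k < n) (d : String) :
    (l.take n).getD k d = l.getD k d := by
  simp [List.getD_eq_getElem?_getD, List.getElem?_take, h]

-- ---- basic facts about A's sweep ----

lemma rfBody_length (n : Nat) (s : List String × Bool) (j : Int) :
    (rfBody n s j).1.length = s.1.length := by
  unfold rfBody
  split_ifs <;> simp [PySem.List.length_pySetD]

lemma rfFold_length (n : Nat) (js : List Int) (s : List String × Bool) :
    ((js.foldl (rfBody n) s).1).length = s.1.length := by
  induction js generalizing s with
  | nil => rfl
  | cons j js ih => simp only [List.foldl_cons]; rw [ih, rfBody_length]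

lemma rfBody_false (n : Nat) (s : List String × Bool) (j : Int)
    (h : (rfBody n s j).2 = false) : rfBody n s j = s := by
  unfold rfBody at *
  split_ifs at h ⊢ <;> simp_all

lemma rfBody_mono (n : Nat) (s : List String × Bool) (j : Int)
    (h : s.2 = true) : (rfBody n s j).2 = true := by
  unfold rfBody
  split_ifs <;> simp_all

lemma rfFold_mono (n : Nat) (js : List Int) (s : List String × Bool)
    (h : s.2 = true) : (js.foldl (rfBody n) s).2 = true := by
  induction js generalizing s with
  | nil => exact h
  | cons j js ih => simp only [List.foldl_cons]; exact ih _ (rfBody_mono n s j h)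

lemma rfFold_false_fix (n : Nat) (js : List Int) (s : List String × Bool)
    (h : (js.foldl (rfBody n) s).2 = false) : js.foldl (rfBody n) s = s := by
  induction js generalizing s with
  | nil => rfl
  | cons j js ih =>
    simp only [List.foldl_cons] at h ⊢
    have hb : (rfBody n s j).2 = false := by
      by_contra hb
      rw [rfFold_mono n js _ (by simpa using hb)] at h
      exact Bool.noConfusion h
    rw [rfBody_false n s j hb] at h ⊢
    exact ih _ h

lemma rfFold_skip (n : Nat) (js : List Int) (row : List String)
    (h : (js.foldl (rfBody n) (row, false)).2 = false) :
    ∀ j ∈ js, rfBody n (row, false) j = (row, false) := by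
  induction js with
  | nil => intro j hj; simp at hj
  | cons j0 js ih =>
    intro j hj
    simp only [List.foldl_cons] at h
    have hb : (rfBody n (row, false) j0).2 = false := by
      by_contra hb
      rw [rfFold_mono n js _ (by simpa using hb)] at h
      exact Bool.noConfusion h
    have hfix := rfBody_false n (row, false) j0 hb
    rcases List.mem_cons.mp hj with rfl | hj'
    · exact hfix
    · rw [hfix] at h
      exact ih h j hj'

-- a sweep that reports no motion leaves rows satisfying the adjacency invariant
lemma settled_of_pass_false (n : Nat) (row : List String) (hn : n ≤ row.length)
    (h : (rfPass n row).2 = false) : RowSettled (row.take n) := by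
  intro k hk1 hc hcs
  have hlen : (row.take n).length = n := by simp [List.length_take]; omega
  rw [hlen] at hk1
  rw [getD_take row n k (by omega)] at hc hcs
  rw [getD_take row n (k+1) (by omega)]
  have hmem : (k : Int) ∈ PySem.List.pyRange ((n : Int) - 1) (-1) (-1) := by
    rw [PySem.List.mem_pyRange_neg_one]; omega
  have hskip := rfFold_skip n _ row h (k : Int) hmem
  unfold rfBody at hskip
  split_ifs at hskip with h1 h2
  · -- the skip condition held: rule out each disjunct
    rcases h1 with h1 | h1 | h1
    · rw [pyGetD_nat] at h1; exact absurd h1 hc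
    · rw [pyGetD_nat] at h1; exact absurd h1 hcs
    · omega
  · -- move branch: result has flag true, contradiction
    exact absurd (congrArg Prod.snd hskip) (by simp)
  · -- no-move: box[i][j+1] ≠ '.'
    have : ((k : Int) + 1) = ((k + 1 : Nat) : Int) := by push_cast; ring
    rw [this, pyGetD_nat] at h2
    exact h2

-- ---- settleSpec equations and facts ----

lemma takeWhile_all {α : Type} (p : α → Bool) (u : List α) (h : ∀ c ∈ u, p c = true) :
    u.takeWhile p = u := by
  induction u with
  | nil => rfl
  | cons c u ih =>
    rw [List.takeWhile_cons, if_pos (h c (by simp))]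
    rw [ih (fun x hx => h x (by simp [hx]))]

lemma dropWhile_all {α : Type} (p : α → Bool) (u : List α) (h : ∀ c ∈ u, p c = true) :
    u.dropWhile p = [] :=
  List.dropWhile_eq_nil_iff.mpr h

lemma settleSpec_no_star (row : List String) (h : ∀ c ∈ row, c ≠ "*") :
    settleSpec row = packSeg row := by
  rw [settleSpec]
  have hd : row.dropWhile (fun c => c ≠ "*") = [] :=
    dropWhile_all _ row (fun c hc => by simpa using h c hc)
  rw [dif_pos hd, takeWhile_all _ row (fun c hc => by simpa using h c hc)]

lemma settleSpec_star (u v : List String) (hu : ∀ c ∈ u, c ≠ "*") :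
    settleSpec (u ++ "*" :: v) = packSeg u ++ "*" :: settleSpec v := by
  have htw : (u ++ "*" :: v).takeWhile (fun c => c ≠ "*") = u := by
    rw [List.takeWhile_append]
    rw [takeWhile_all _ u (fun c hc => by simpa using hu c hc)]
    rw [if_pos rfl, List.takeWhile_cons]
    simp
  have hdw : (u ++ "*" :: v).dropWhile (fun c => c ≠ "*") = "*" :: v := by
    rw [List.dropWhile_append]
    rw [dropWhile_all _ u (fun c hc => by simpa using hu c hc)]
    simp [List.dropWhile_cons]
  rw [settleSpec]
  simp only [hdw, htw]
  rw [dif_neg (List.cons_ne_nil "*" v)]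
  rfl
lemma packSeg_dotfree_tail (d : Nat) (t : List String) (ht : "." ∉ t) :
    packSeg (List.replicate d "." ++ t) = List.replicate d "." ++ t := by
  have hrev : (List.replicate d "." ++ t).reverse = t.reverse ++ List.replicate d "." := by
    rw [List.reverse_append, List.reverse_replicate]
  have htw : (t.reverse ++ List.replicate d ".").takeWhile (fun c => c ≠ ".") = t.reverse := by
    rw [List.takeWhile_append]
    rw [takeWhile_all _ t.reverse (fun c hc => by
      simp only [decide_eq_true_eq]
      intro hcc; subst hcc; exact ht (List.mem_reverse.mp hc))]
    rw [if_pos rfl, List.takeWhile_replicate]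
    simp
  have hcnt : (List.replicate d "." ++ t).count "." = d := by
    rw [List.count_append, List.count_replicate]
    simp [List.count_eq_zero.mpr ht]
  have hdrop : (List.replicate d "." ++ t).drop d = t := by
    simpa using List.drop_left (l₁ := List.replicate d (".":String)) (l₂ := t)
  have hlen2 : (List.replicate d "." ++ t).length - t.reverse.length = d := by simp
  rw [packSeg_eq, hrev, htw, hcnt, hlen2, hdrop]
  simp
lemma RowSettled_tail (c : String) (u : List String) (h : RowSettled (c :: u)) :
    RowSettled u := by
  intro k hk hc hcs
  have := h (k + 1) (by simpa using Nat.succ_lt_succ hk)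
  simpa using this (by simpa using hc) (by simpa using hcs)

lemma settled_nodot (u : List String) : ∀ c : String, (∀ x ∈ c :: u, x ≠ "*") →
    RowSettled (c :: u) → c ≠ "." → "." ∉ c :: u := by
  induction u with
  | nil =>
    intro c _ _ hc hmem
    rcases List.mem_cons.mp hmem with h | h
    · exact hc h.symm
    · simp at h
  | cons b u ih =>
    intro c hstar hset hc
    have hb : b ≠ "." := by
      have := hset 0 (by simp) (by simpa using hc) (by simpa using hstar c (by simp))
      simpa using this
    have hrest := ih b (fun x hx => hstar x (by simp at hx ⊢; tauto))
      (RowSettled_tail c _ hset) hb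
    intro hmem
    rcases List.mem_cons.mp hmem with h | h
    · exact hc h.symm
    · exact hrest h
lemma settled_shape (u : List String) (hstar : ∀ c ∈ u, c ≠ "*") (h : RowSettled u) :
    ∃ d t, u = List.replicate d "." ++ t ∧ "." ∉ t := by
  induction u with
  | nil => exact ⟨0, [], rfl, by simp⟩
  | cons c u ih =>
    by_cases hc : c = "."
    · obtain ⟨d, t, hu, ht⟩ := ih (fun x hx => hstar x (by simp [hx])) (RowSettled_tail c u h)
      exact ⟨d + 1, t, by rw [hc, List.replicate_succ, List.cons_append, hu], ht⟩
    · exact ⟨0, c :: u, rfl, settled_nodot u c hstar h hc⟩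

lemma packSeg_settled (u : List String) (hstar : ∀ c ∈ u, c ≠ "*") (h : RowSettled u) :
    packSeg u = u := by
  obtain ⟨d, t, hu, ht⟩ := settled_shape u hstar h
  rw [hu, packSeg_dotfree_tail d t ht]

lemma RowSettled_append_left (u v : List String) (h : RowSettled (u ++ v)) :
    RowSettled u := by
  intro k hk hc hcs
  have hk1 : k + 1 < (u ++ v).length := by simp; omega
  have := h k hk1
  rw [getD_append_left u v k (by omega), getD_append_left u v (k+1) (by omega)] at this
  exact this hc hcs

lemma RowSettled_append_right (u v : List String) (h : RowSettled (u ++ v)) :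
    RowSettled v := by
  intro k hk hc hcs
  have hk1 : u.length + (k + 1) < (u ++ v).length := by simp; omega
  have := h (u.length + k) (by omega)
  rw [show u.length + k + 1 = u.length + (k + 1) by omega] at this
  rw [getD_append_right u v k, getD_append_right u v (k+1)] at this
  exact this hc hcs

lemma star_decomp (row : List String) (h : "*" ∈ row) :
    ∃ u v, row = u ++ "*" :: v ∧ (∀ c ∈ u, c ≠ "*") := by
  have hne : row.dropWhile (fun c => c ≠ "*") ≠ [] := by
    intro hnil
    rw [List.dropWhile_eq_nil_iff] at hnil
    simpa using hnil "*" h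
  cases hdw : row.dropWhile (fun c => c ≠ "*") with
  | nil => exact absurd hdw hne
  | cons c0 v =>
    have hc0 : c0 = "*" := by
      have := List.head_dropWhile_not (fun c : String => c ≠ "*") hne
      simp only [hdw, List.head_cons] at this
      simpa using this
    subst hc0
    refine ⟨row.takeWhile (fun c => c ≠ "*"), v, ?_, ?_⟩
    · conv_lhs => rw [← List.takeWhile_append_dropWhile (p := fun c : String => c ≠ "*") (l := row)]
      rw [hdw]
    · intro c hc
      simpa using List.mem_takeWhile_imp hc
lemma settleSpec_settled : ∀ (N : Nat) (row : List String), row.length ≤ N →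
    RowSettled row → settleSpec row = row := by
  intro N
  induction N with
  | zero =>
    intro row hlen _
    have : row = [] := List.length_eq_zero_iff.mp (by omega)
    subst this
    rw [settleSpec_no_star [] (by simp)]
    rfl
  | succ N ih =>
    intro row hlen h
    by_cases hstar : "*" ∈ row
    · obtain ⟨u, v, hrow, hu⟩ := star_decomp row hstar
      subst hrow
      rw [settleSpec_star u v hu]
      rw [packSeg_settled u hu (RowSettled_append_left _ _ h)]
      have hv : RowSettled v := RowSettled_tail _ _ (RowSettled_append_right _ _ h)
      rw [ih v (by simp at hlen; omega) hv]
    · rw [settleSpec_no_star row (fun c hc hcc => hstar (hcc ▸ hc))]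
      exact packSeg_settled row (fun c hc hcc => hstar (hcc ▸ hc)) h
-- ---- a single move of A preserves B's row result ----

lemma takeWhile_append_stop {α : Type} (p : α → Bool) (l l' : List α)
    (h : ∃ x ∈ l, p x = false) : (l ++ l').takeWhile p = l.takeWhile p := by
  rw [List.takeWhile_append]
  rw [if_neg]
  intro hlen
  have heq : l.takeWhile p = l := (List.takeWhile_prefix p).eq_of_length hlen
  obtain ⟨x, hx, hpx⟩ := h
  have := List.mem_takeWhile_imp (heq ▸ hx)
  rw [this] at hpx
  exact Bool.noConfusion hpx

lemma packSeg_move (u w : List String) (c : String) (hc : c ≠ ".") :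
    packSeg (u ++ "." :: "#" :: w) = packSeg (u ++ c :: "." :: w) := by
  have hlen : (u ++ "." :: "#" :: w).length = (u ++ c :: "." :: w).length := by simp
  have hcnt : (u ++ "." :: "#" :: w).count "." = (u ++ c :: "." :: w).count "." := by
    simp only [List.count_append, List.count_cons]
    have h1 : (("#" : String) == ".") = false := by decide
    have h2 : (("." : String) == ".") = true := by decide
    have h3 : (c == ".") = false := by simpa using hc
    simp [h1, h2, h3]
  have hrevL : (u ++ "." :: "#" :: w).reverse = w.reverse ++ (["#"] ++ ("." :: u.reverse)) := by
    simp
  have hrevR : (u ++ c :: "." :: w).reverse = w.reverse ++ ("." :: c :: u.reverse) := by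
    simp
  by_cases hw : "." ∈ w
  · -- the takeWhile stops inside w.reverse on both sides
    have hstop : ∃ x ∈ w.reverse, (decide (x ≠ ".")) = false :=
      ⟨".", List.mem_reverse.mpr hw, by simp⟩
    have htwL : (u ++ "." :: "#" :: w).reverse.takeWhile (fun c => c ≠ ".") =
        w.reverse.takeWhile (fun c => c ≠ ".") := by
      rw [hrevL, takeWhile_append_stop _ _ _ hstop]
    have htwR : (u ++ c :: "." :: w).reverse.takeWhile (fun c => c ≠ ".") =
        w.reverse.takeWhile (fun c => c ≠ ".") := by
      rw [hrevR, takeWhile_append_stop _ _ _ hstop]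
    rw [packSeg_eq, packSeg_eq, htwL, htwR, hcnt, hlen]
    set t := w.reverse.takeWhile (fun c => c ≠ ".") with ht
    have htle : t.length ≤ w.length := by
      have h0 := List.IsPrefix.length_le
        (List.takeWhile_prefix (fun c : String => c ≠ ".") (l := w.reverse))
      rw [List.length_reverse] at h0
      exact h0
    have hi : (u ++ c :: "." :: w).length - t.length =
        u.length + 2 + (w.length - t.length) := by
      simp only [List.length_append, List.length_cons]
      omega
    rw [hi]
    have hdL : (u ++ "." :: "#" :: w).drop (u.length + 2 + (w.length - t.length)) =
        w.drop (w.length - t.length) := by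
      rw [show u ++ "." :: "#" :: w = (u ++ [".", "#"]) ++ w by simp, List.drop_append]
      have hnil : (u ++ [(".":String), "#"]).drop (u.length + 2 + (w.length - t.length)) = [] :=
        List.drop_eq_nil_of_le (by simp only [List.length_append, List.length_cons, List.length_nil]; omega)
      rw [hnil, List.nil_append]
      congr 1
      simp only [List.length_append, List.length_cons, List.length_nil]
      omega
    have hdR : (u ++ c :: "." :: w).drop (u.length + 2 + (w.length - t.length)) =
        w.drop (w.length - t.length) := by
      rw [show u ++ c :: "." :: w = (u ++ [c, "."]) ++ w by simp, List.drop_append]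
      have hnil : (u ++ [c, (".":String)]).drop (u.length + 2 + (w.length - t.length)) = [] :=
        List.drop_eq_nil_of_le (by simp only [List.length_append, List.length_cons, List.length_nil]; omega)
      rw [hnil, List.nil_append]
      congr 1
      simp only [List.length_append, List.length_cons, List.length_nil]
      omega
    rw [hdL, hdR]
  · -- w is dot-free: the unmoved tail gains the just-moved stone on the left side
    have hwrev : ∀ x ∈ w.reverse, (decide (x ≠ ".")) = true := by
      intro x hx
      simp only [decide_eq_true_eq]
      intro hxx; subst hxx; exact hw (List.mem_reverse.mp hx)
    have htwL : (u ++ "." :: "#" :: w).reverse.takeWhile (fun c => c ≠ ".") =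
        w.reverse ++ ["#"] := by
      rw [hrevL, List.takeWhile_append, takeWhile_all _ w.reverse hwrev, if_pos rfl]
      simp [List.takeWhile_cons]
    have htwR : (u ++ c :: "." :: w).reverse.takeWhile (fun c => c ≠ ".") = w.reverse := by
      rw [hrevR, List.takeWhile_append, takeWhile_all _ w.reverse hwrev, if_pos rfl]
      simp [List.takeWhile_cons]
    rw [packSeg_eq, packSeg_eq, htwL, htwR, hcnt, hlen]
    have hiL : (u ++ c :: "." :: w).length - (w.reverse ++ ["#"]).length = u.length + 1 := by
      simp only [List.length_append, List.length_cons, List.length_reverse, List.length_nil]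
      omega
    have hiR : (u ++ c :: "." :: w).length - w.reverse.length = u.length + 2 := by
      simp only [List.length_append, List.length_cons, List.length_reverse]
      omega
    rw [hiL, hiR]
    have hdL : (u ++ "." :: "#" :: w).drop (u.length + 1) = "#" :: w := by
      rw [show u ++ "." :: "#" :: w = (u ++ ["."]) ++ "#" :: w by simp]
      rw [show u.length + 1 = (u ++ [(".":String)]).length by simp]
      exact List.drop_left
    have hdR : (u ++ c :: "." :: w).drop (u.length + 2) = w := by
      rw [show u ++ c :: "." :: w = (u ++ [c, "."]) ++ w by simp]
      rw [show u.length + 2 = (u ++ [c, (".":String)]).length by simp]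
      exact List.drop_left
    rw [hdL, hdR]
    have hdots : (u ++ c :: "." :: w).count "." ≤ u.length + 1 := by
      rw [List.count_append, List.count_cons, List.count_cons]
      have h3 : (c == ".") = false := by simpa using hc
      have hw0 : w.count "." = 0 := List.count_eq_zero.mpr hw
      have hu := List.count_le_length (l := u) (a := (".":String))
      simp [h3, hw0]
      omega
    set dts := (u ++ c :: "." :: w).count "." with hd
    have hrep : List.replicate (u.length + 2 - dts) ("#":String) =
        List.replicate (u.length + 1 - dts) "#" ++ ["#"] := by
      rw [← List.replicate_succ']
      congr 1
      omega
    rw [hrep]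
    simp
lemma settleSpec_move_nostar (u v : List String) (c : String) (hc1 : c ≠ ".")
    (hc2 : c ≠ "*") (hu : ∀ x ∈ u, x ≠ "*") :
    settleSpec (u ++ "." :: "#" :: v) = settleSpec (u ++ c :: "." :: v) := by
  by_cases hstar : "*" ∈ v
  · obtain ⟨v1, v2, hv, hv1⟩ := star_decomp v hstar
    subst hv
    have e1 : u ++ "." :: "#" :: (v1 ++ "*" :: v2) =
        (u ++ "." :: "#" :: v1) ++ "*" :: v2 := by simp
    have e2 : u ++ c :: "." :: (v1 ++ "*" :: v2) =
        (u ++ c :: "." :: v1) ++ "*" :: v2 := by simp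
    rw [e1, e2]
    rw [settleSpec_star _ _ (by
      intro x hx; simp at hx
      rcases hx with hx | rfl | rfl | hx
      · exact hu x hx
      · decide
      · decide
      · exact hv1 x hx)]
    rw [settleSpec_star _ _ (by
      intro x hx; simp at hx
      rcases hx with hx | rfl | rfl | hx
      · exact hu x hx
      · exact hc2
      · decide
      · exact hv1 x hx)]
    congr 1
    have e3 : u ++ "." :: "#" :: v1 = u ++ "." :: "#" :: v1 := rfl
    exact packSeg_move u v1 c hc1
  · rw [settleSpec_no_star _ (by
      intro x hx; simp at hx
      rcases hx with hx | rfl | rfl | hx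
      · exact hu x hx
      · decide
      · decide
      · exact fun hh => hstar (hh ▸ hx))]
    rw [settleSpec_no_star _ (by
      intro x hx; simp at hx
      rcases hx with hx | rfl | rfl | hx
      · exact hu x hx
      · exact hc2
      · decide
      · exact fun hh => hstar (hh ▸ hx))]
    exact packSeg_move u v c hc1

lemma settleSpec_move (c : String) (hc1 : c ≠ ".") (hc2 : c ≠ "*") :
    ∀ (N : Nat) (u : List String), u.length ≤ N → ∀ (v : List String),
    settleSpec (u ++ "." :: "#" :: v) = settleSpec (u ++ c :: "." :: v) := by
  intro N
  induction N with
  | zero =>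
    intro u hu v
    have hnil : u = [] := List.length_eq_zero_iff.mp (by omega)
    subst hnil
    exact settleSpec_move_nostar [] v c hc1 hc2 (by simp)
  | succ N ih =>
    intro u hu v
    by_cases hstar : "*" ∈ u
    · obtain ⟨u1, u2, hudec, hu1⟩ := star_decomp u hstar
      subst hudec
      have e1 : (u1 ++ "*" :: u2) ++ "." :: "#" :: v = u1 ++ "*" :: (u2 ++ "." :: "#" :: v) := by
        simp
      have e2 : (u1 ++ "*" :: u2) ++ c :: "." :: v = u1 ++ "*" :: (u2 ++ c :: "." :: v) := by
        simp
      rw [e1, e2, settleSpec_star _ _ hu1, settleSpec_star _ _ hu1]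
      have hlen2 : u2.length ≤ N := by
        have : (u1 ++ "*" :: u2).length = u1.length + 1 + u2.length := by simp; omega
        omega
      rw [ih u2 hlen2 v]
    · exact settleSpec_move_nostar u v c hc1 hc2 (fun x hx hxx => hstar (hxx ▸ hx))

-- ---- A's sweep preserves B's row result ----

lemma list_decomp_at (l : List String) (k : Nat) (h : k + 1 < l.length) :
    l = l.take k ++ l.getD k "" :: l.getD (k + 1) "" :: l.drop (k + 2) ∧
      (l.take k).length = k := by
  constructor
  · conv_lhs => rw [← List.take_append_drop k l]
    congr 1
    rw [List.drop_eq_getElem_cons (by omega : k < l.length)]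
    rw [List.drop_eq_getElem_cons (by omega : k + 1 < l.length)]
    rw [List.getD_eq_getElem?_getD, List.getElem?_eq_getElem (by omega : k < l.length)]
    rw [List.getD_eq_getElem?_getD, List.getElem?_eq_getElem (by omega : k + 1 < l.length)]
    rfl
  · simp [List.length_take]; omega

lemma set_cons_cons (u v : List String) (a b x y : String) :
    ((u ++ a :: b :: v).set (u.length + 1) y).set u.length x = u ++ x :: y :: v := by
  rw [List.set_append, if_neg (by omega)]
  have h1 : (a :: b :: v).set (u.length + 1 - u.length) y = a :: y :: v := by
    have : u.length + 1 - u.length = 1 := by omega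
    rw [this]
    rfl
  rw [h1, List.set_append, if_neg (by omega)]
  have h2 : (a :: y :: v).set (u.length - u.length) x = x :: y :: v := by
    have : u.length - u.length = 0 := by omega
    rw [this]
    rfl
  rw [h2]

lemma settleSpec_take_move (n : Nat) (r : List String) (k : Nat) (hn : n ≤ r.length)
    (hkn : k + 1 < n) (hc : r.getD k "" ≠ ".") (hcs : r.getD k "" ≠ "*")
    (hd : r.getD (k + 1) "" = ".") :
    settleSpec (((r.set (k + 1) "#").set k ".").take n) = settleSpec (r.take n) ∧
      ((r.set (k + 1) "#").set k ".").drop n = r.drop n := by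
  constructor
  · rw [List.take_set, List.take_set]
    set l := r.take n with hl
    have hlen : l.length = n := by simp [hl, List.length_take]; omega
    have hgk : l.getD k "" = r.getD k "" := getD_take r n k (by omega) ""
    have hgk1 : l.getD (k + 1) "" = r.getD (k + 1) "" := getD_take r n (k + 1) (by omega) ""
    obtain ⟨hdec0, htk⟩ := list_decomp_at l k (by omega)
    rw [hgk, hgk1, hd] at hdec0
    have hset : (l.set (k + 1) "#").set k "." =
        l.take k ++ "." :: "#" :: l.drop (k + 2) := by
      have h2 := set_cons_cons (l.take k) (l.drop (k + 2)) (r.getD k "") "." "." "#"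
      rw [htk] at h2
      conv_lhs => rw [hdec0]
      exact h2
    rw [hset]
    have hmv := settleSpec_move (r.getD k "") hc hcs (l.take k).length (l.take k)
      (le_refl _) (l.drop (k + 2))
    rw [hmv]
    conv_rhs => rw [hdec0]
  · rw [List.drop_set, if_pos (by omega : k < n), List.drop_set,
      if_pos (by omega : k + 1 < n)]
lemma rfFold_settleSpec (n : Nat) (js : List Int)
    (hjs : ∀ j ∈ js, 0 ≤ j ∧ j ≤ (n : Int) - 1) :
    ∀ s : List String × Bool, n ≤ s.1.length →
    settleSpec ((js.foldl (rfBody n) s).1.take n) = settleSpec (s.1.take n) ∧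
      (js.foldl (rfBody n) s).1.drop n = s.1.drop n := by
  induction js with
  | nil => intro s _; exact ⟨rfl, rfl⟩
  | cons j js ih =>
    intro s hs
    simp only [List.foldl_cons]
    obtain ⟨hj0, hjn⟩ := hjs j (by simp)
    have hstep : settleSpec ((rfBody n s j).1.take n) = settleSpec (s.1.take n) ∧
        (rfBody n s j).1.drop n = s.1.drop n := by
      unfold rfBody
      split_ifs with h1 h2
      · exact ⟨rfl, rfl⟩
      · -- move branch
        simp only
        have hdopt : PySem.List.pyGet? s.1 (j + 1) = some "." := by
          cases hopt : PySem.List.pyGet? s.1 (j + 1) with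
          | none => rw [hopt] at h2; simp at h2
          | some v => rw [hopt] at h2; simp at h2; rw [h2]
        rw [PySem.List.pyGet?_of_nonneg s.1 (by omega : (0:Int) ≤ j + 1)] at hdopt
        have hlen : (j + 1).toNat < s.1.length := by
          by_contra hcon
          rw [List.getElem?_eq_none (by omega)] at hdopt
          simp at hdopt
        have hk1 : (j + 1).toNat = j.toNat + 1 := by omega
        rw [hk1] at hdopt hlen
        have hdget : s.1.getD (j.toNat + 1) "" = "." := by
          rw [List.getD_eq_getElem?_getD, hdopt]; rfl
        push_neg at h1
        have hjlen : j.toNat < s.1.length := by omega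
        rw [PySem.List.pyGet?_of_nonneg s.1 hj0] at h1
        rw [List.getElem?_eq_getElem hjlen] at h1
        simp only [Option.getD_some] at h1
        have hcget : s.1.getD j.toNat "" ≠ "." := by
          rw [List.getD_eq_getElem?_getD, List.getElem?_eq_getElem hjlen]
          simpa using h1.1
        have hcgets : s.1.getD j.toNat "" ≠ "*" := by
          rw [List.getD_eq_getElem?_getD, List.getElem?_eq_getElem hjlen]
          simpa using h1.2.1
        have hkn : j.toNat + 1 < n := by
          have := h1.2.2
          omega
        rw [PySem.List.pySetD_of_nonneg _ _ (by omega : (0:Int) ≤ j + 1),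
            PySem.List.pySetD_of_nonneg _ _ hj0, hk1]
        exact settleSpec_take_move n s.1 j.toNat hs hkn hcget hcgets hdget
      · exact ⟨rfl, rfl⟩
    have hrest := ih (fun j' hj' => hjs j' (by simp [hj'])) (rfBody n s j)
      (by rw [rfBody_length]; exact hs)
    exact ⟨hrest.1.trans hstep.1, hrest.2.trans hstep.2⟩

-- ---- the per-row main lemma ----

lemma rfWhileFuel_eq (n : Nat) : ∀ (fuel : Nat) (row : List String),
    n * n - rfPhi n row < fuel → n ≤ row.length →
    rfWhileFuel fuel n row = settleSpec (row.take n) ++ row.drop n := by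
  intro fuel
  induction fuel with
  | zero => intro row hf; omega
  | succ fuel ih =>
    intro row hf hn
    by_cases hmv : (rfPass n row).2 = true
    · rw [rfWhileFuel, if_pos hmv]
      have hlen : (rfPass n row).1.length = row.length := by
        unfold rfPass; rw [rfFold_length]
      have hprog := rfPass_progress n row hmv
      have hinv := rfFold_settleSpec n (PySem.List.pyRange ((n : Int) - 1) (-1) (-1))
        (fun j hj => by rw [PySem.List.mem_pyRange_neg_one] at hj; omega)
        (row, false) (by simpa using hn)
      rw [ih (rfPass n row).1 (by omega) (by omega)]
      have h1 : settleSpec ((rfPass n row).1.take n) = settleSpec (row.take n) := hinv.1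
      have h2 : (rfPass n row).1.drop n = row.drop n := hinv.2
      rw [h1, h2]
    · rw [rfWhileFuel, if_neg hmv]
      have hfix := rfFold_false_fix n _ (row, false) (by simpa using hmv)
      have hrow : (rfPass n row).1 = row := by unfold rfPass; rw [hfix]
      rw [hrow]
      have hset := settled_of_pass_false n row hn (by simpa using hmv)
      rw [settleSpec_settled (row.take n).length _ (le_refl _) hset]
      exact (List.take_append_drop n row).symm

lemma rfWhile_eq_settleSpec (n : Nat) : ∀ (row : List String), n ≤ row.length →
    rfWhile n row = settleSpec (row.take n) ++ row.drop n := by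
  intro row hn
  exact rfWhileFuel_eq n (n * n + 1) row (by omega) hn
-- ---- B's fold equals settleSpec ----

lemma settleFold_spec :
    ∀ (rowpart out seg : List String), (∀ c ∈ seg, c ≠ "*") →
    ((rowpart.foldl (fun (st : List String × List String) c =>
        if c = "*" then (st.1 ++ packSeg st.2 ++ ["*"], ([] : List String))
        else (st.1, st.2 ++ [c])) (out, seg)).1 ++
      packSeg ((rowpart.foldl (fun (st : List String × List String) c =>
        if c = "*" then (st.1 ++ packSeg st.2 ++ ["*"], ([] : List String))
        else (st.1, st.2 ++ [c])) (out, seg)).2)) =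
      out ++ settleSpec (seg ++ rowpart) := by
  intro rowpart
  induction rowpart with
  | nil =>
    intro out seg hseg
    simp only [List.foldl_nil, List.append_nil]
    rw [settleSpec_no_star seg hseg]
  | cons c rest ih =>
    intro out seg hseg
    simp only [List.foldl_cons]
    by_cases hc : c = "*"
    · rw [if_pos hc]
      rw [ih (out ++ packSeg seg ++ ["*"]) [] (by simp)]
      subst hc
      rw [settleSpec_star seg rest hseg]
      simp
    · rw [if_neg hc]
      rw [ih out (seg ++ [c]) (by
        intro x hx
        rcases List.mem_append.mp hx with hx | hx
        · exact hseg x hx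
        · simp at hx; subst hx; exact hc)]
      congr 2
      simp

lemma settleRow_eq_settleSpec (n : Nat) (row : List String) :
    settleRow n row = settleSpec (row.take n) := by
  unfold settleRow
  have := settleFold_spec (row.take n) [] [] (by simp)
  simpa using this

-- ---- lengths ----

lemma packSeg_length (seg : List String) : (packSeg seg).length = seg.length := by
  set t := seg.reverse.takeWhile (fun c => c ≠ ".") with ht
  have hsplit : seg.reverse = t ++ seg.reverse.dropWhile (fun c => c ≠ ".") := by
    rw [ht, List.takeWhile_append_dropWhile]
  set rest := seg.reverse.dropWhile (fun c => c ≠ ".") with hrest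
  have hseg : seg = rest.reverse ++ t.reverse := by
    have := congrArg List.reverse hsplit
    simpa using this
  have htle : t.length ≤ seg.length := by
    have h0 := List.IsPrefix.length_le
      (List.takeWhile_prefix (fun c : String => c ≠ ".") (l := seg.reverse))
    rw [List.length_reverse] at h0
    exact h0
  have htnd : "." ∉ t := by
    intro hmem
    have := List.mem_takeWhile_imp (ht ▸ hmem)
    simp at this
  have hcnt : seg.count "." ≤ seg.length - t.length := by
    conv_lhs => rw [hseg]
    rw [List.count_append]
    have h1 : t.reverse.count "." = 0 := by
      rw [List.count_eq_zero]
      intro hmem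
      exact htnd (List.mem_reverse.mp hmem)
    have h2 : rest.reverse.count "." ≤ rest.length := by
      have := List.count_le_length (l := rest.reverse) (a := (".":String))
      simpa using this
    have h3 : rest.length = seg.length - t.length := by
      have := congrArg List.length hseg
      simp at this
      omega
    omega
  rw [packSeg_eq]
  simp only [List.length_append, List.length_replicate, List.length_drop, ← ht]
  omega
lemma settleSpec_length : ∀ (N : Nat) (row : List String), row.length ≤ N →
    (settleSpec row).length = row.length := by
  intro N
  induction N with
  | zero =>
    intro row hlen
    have : row = [] := List.length_eq_zero_iff.mp (by omega)
    subst this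
    rw [settleSpec_no_star [] (by simp)]
    rfl
  | succ N ih =>
    intro row hlen
    by_cases hstar : "*" ∈ row
    · obtain ⟨u, v, hrow, hu⟩ := star_decomp row hstar
      subst hrow
      rw [settleSpec_star u v hu]
      have hv := ih v (by simp only [List.length_append, List.length_cons] at hlen; omega)
      simp only [List.length_append, List.length_cons, packSeg_length, hv]
    · rw [settleSpec_no_star row (fun c hc hcc => hstar (hcc ▸ hc))]
      exact packSeg_length row
-- ---- rotation ----

lemma rot_eq (FA FB : List (List String)) (n : Nat) (hl : FA.length = FB.length)
    (hread : ∀ idx, idx < FA.length → ∀ i, i < n →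
      (PySem.List.pyGet? (FA.getD idx []) (i : Int)).getD "" =
      (PySem.List.pyGet? (FB.getD idx []) (i : Int)).getD "") :
    (PySem.List.pyRange 0 (n : Int) 1).map (fun i =>
      (PySem.List.pyRange 0 (FA.length : Int) 1).map (fun j =>
        (PySem.List.pyGet? ((PySem.List.pyGet? FA ((FA.length : Int) - 1 - j)).getD []) i).getD "")) =
    (List.range n).map (fun (i : Nat) => FB.reverse.map (fun r => (PySem.List.pyGet? r (i : Int)).getD "")) := by
  apply List.ext_getElem
  · simp [PySem.List.length_pyRange_one]
  · intro k h1 h2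
    have hkn : k < n := by simpa using h2
    rw [List.getElem_map, List.getElem_map,
        PySem.List.getElem_pyRange_one 0 (n : Int) k (by simpa using h1),
        List.getElem_range (by simpa using h2)]
    apply List.ext_getElem
    · simp [PySem.List.length_pyRange_one, hl]
    · intro t ht1 ht2
      have hm : t < FA.length := by
        simp [PySem.List.length_pyRange_one] at ht1
        omega
      rw [List.getElem_map, List.getElem_map,
          PySem.List.getElem_pyRange_one 0 (FA.length : Int) t (by simpa using ht1)]
      have hidx : (FA.length : Int) - 1 - (0 + (t : Int)) = ((FA.length - 1 - t : Nat) : Int) := by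
        omega
      rw [hidx]
      have hgA : PySem.List.pyGet? FA ((FA.length - 1 - t : Nat) : Int) =
          some (FA[FA.length - 1 - t]'(by omega)) := by
        rw [PySem.List.pyGet?_natCast]
        exact List.getElem?_eq_getElem (by omega)
      rw [hgA]
      simp only [Option.getD_some, List.getElem_reverse]
      have hz : ((0 : Int) + (k : Int)) = ((k : Nat) : Int) := by omega
      rw [hz]
      have hres := hread (FA.length - 1 - t) (by omega) k hkn
      have hgdA : FA.getD (FA.length - 1 - t) [] = FA[FA.length - 1 - t]'(by omega) := by
        rw [List.getD_eq_getElem?_getD, List.getElem?_eq_getElem (by omega)]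
        rfl
      have hgdB : FB.getD (FA.length - 1 - t) [] = FB[FA.length - 1 - t]'(by omega) := by
        rw [List.getD_eq_getElem?_getD,
            List.getElem?_eq_getElem (by omega : FA.length - 1 - t < FB.length)]
        rfl
      rw [hgdA, hgdB] at hres
      have hix : FB.length - 1 - t = FA.length - 1 - t := by omega
      simp only [hix]
      exact hres

-- ---- assembly ----

theorem rotateAndFall_spec_aux (box : List (List String)) (hpre : Pre_rotateAndFall box) :
    rotateAndFall box = rotateAndFall_alt box := by
  obtain ⟨hne, hrows⟩ := hpre
  cases box with
  | nil => exact absurd rfl hne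
  | cons r0 rest =>
    unfold rotateAndFall rotateAndFall_alt
    have hg0 : PySem.List.pyGet? (r0 :: rest) 0 = some r0 := PySem.List.pyGet?_zero_cons r0 rest
    rw [hg0]
    simp only [Option.getD_some]
    set n := r0.length with hn
    set FA := (r0 :: rest).map (fun row => rfWhile n row) with hFA
    set FB := (r0 :: rest).map (fun row => settleRow n row) with hFB
    have hlenFA : FA.length = (r0 :: rest).length := by rw [hFA, List.length_map]
    rw [← hlenFA]
    apply rot_eq
    · rw [hFA, hFB, List.length_map, List.length_map]
    · intro idx hidx i hi
      have hidx' : idx < (r0 :: rest).length := by rwa [hlenFA] at hidx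
      have hrowlen : n ≤ ((r0 :: rest)[idx]).length := by
        apply hrows
        exact List.getElem_mem hidx'
      have hgdA : FA.getD idx [] = rfWhile n ((r0 :: rest)[idx]) := by
        rw [hFA, List.getD_eq_getElem?_getD, List.getElem?_map,
            List.getElem?_eq_getElem hidx']
        rfl
      have hgdB : FB.getD idx [] = settleRow n ((r0 :: rest)[idx]) := by
        rw [hFB, List.getD_eq_getElem?_getD, List.getElem?_map,
            List.getElem?_eq_getElem hidx']
        rfl
      rw [hgdA, hgdB]
      set row := (r0 :: rest)[idx] with hrow
      rw [rfWhile_eq_settleSpec n row hrowlen, settleRow_eq_settleSpec n row]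
      have hslen : (settleSpec (row.take n)).length = n := by
        rw [settleSpec_length (row.take n).length _ (le_refl _)]
        simp [List.length_take]
        omega
      rw [PySem.List.pyGet?_natCast, PySem.List.pyGet?_natCast, List.getElem?_append]
      rw [if_pos (by rw [hslen]; exact hi)]

-- ===== VERDICT (by name: the statement is the Claim_ definition above) =====
theorem rotateAndFall_spec : Claim_equal_rotateAndFall := by
  intro box _ hpre
  unfold Spec_rotateAndFall
  exact rotateAndFall_spec_aux box hpre
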